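-- pv_equiv track=rewrite | github.com/sangwopa/baekjoon.py | programmers/더맵게.py | solution
-- ===== SOURCE A (Python) =====
-- from collections import deque
--
-- def solution(scoville, K):
--     answer = 0
--     scoville.sort()
--     tmp_que = deque(scoville)
--
--     while 1:
--         if len(tmp_que) == 1:
--             return -1
--         tmp = tmp_que.popleft() + (tmp_que.popleft() * 2)
--         tmp_que.append(tmp)
--         tmp_que = deque(sorted(tmp_que))
--         answer += 1
--         if tmp_que[0] < K:
--             continue
--         else:
--             break
--
--     return answer
-- ===== SOURCE B (Python) =====
-- from collections import deque
--
-- def _pop_min(base, merged):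
--     # pop the smaller of the two queue fronts
--     if merged and (not base or merged[0] < base[0]):
--         return merged.popleft()
--     return base.popleft()
--
-- def solution(scoville, K):
--     # two sorted queues: one sort up front; merged values are created in
--     # nondecreasing order, so the global minimum is always at a queue front
--     base = deque(sorted(scoville))
--     merged = deque()
--     answer = 0
--     while True:
--         if len(base) + len(merged) == 1:
--             return -1
--         a = _pop_min(base, merged)
--         b = _pop_min(base, merged)
--         merged.append(a + 2 * b)
--         answer += 1
--         if merged and (not base or merged[0] < base[0]):
--             cur = merged[0]
--         else:
--             cur = base[0]
--         if cur < K: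
--             continue
--         else:
--             return answer
-- ===== Notes on version B (the rewrite author's own statement) =====
-- stated objective: faster
-- what changed: Replaces the full re-sort of the deque after every merge with two sorted queues (the input sorted once, plus a queue of merged values, which are created in nondecreasing order), so each merge step pops/appends at queue fronts in O(1) instead of sorting; the loop shape (merge the two smallest, then test the minimum) is kept.
import Mathlib
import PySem

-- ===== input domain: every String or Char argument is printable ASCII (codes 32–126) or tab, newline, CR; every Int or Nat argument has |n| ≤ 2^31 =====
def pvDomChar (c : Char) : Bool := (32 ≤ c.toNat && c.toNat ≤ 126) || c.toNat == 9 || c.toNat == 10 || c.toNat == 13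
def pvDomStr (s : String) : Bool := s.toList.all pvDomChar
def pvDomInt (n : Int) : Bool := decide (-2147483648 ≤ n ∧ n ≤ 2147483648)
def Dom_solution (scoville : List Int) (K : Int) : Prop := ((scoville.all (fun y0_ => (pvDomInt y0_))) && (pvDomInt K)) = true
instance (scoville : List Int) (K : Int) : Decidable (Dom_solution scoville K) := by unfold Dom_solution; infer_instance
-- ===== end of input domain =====

-- B replaces A's full re-sort of the pool after every merge with two sorted queues (one initial
-- sort, O(1) per merge): the input, sorted once, and the queue of merged values, which are created
-- in nondecreasing order, so the pool minimum is always at one of the two queue fronts.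
-- A sorts its list argument in place (scoville.sort()); the equivalence proved here is about the
-- RETURN value only (B does not mutate its argument).

-- ===== PORT A =====
-- A's while-loop: pop the two smallest, append a + 2b, re-sort the whole deque.
-- fuel = initial list length bounds the number of iterations (the pool shrinks by one per pass),
-- so the fuel = 0 branch is unreachable; q = [] is where Python raises IndexError (Pre_ excludes it).
def solutionALoop (K : Int) (fuel : Nat) (q : List Int) (answer : Int) : Int :=
  if q.length = 1 then -1
  else
    match q, fuel with
    | a :: b :: rest, f + 1 =>
      let tmp := a + b * 2
      let q2 := PySem.List.sorted (rest ++ [tmp]) (fun x => x)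
      if q2.headI < K then solutionALoop K f q2 (answer + 1) else answer + 1
    | _, _ => 0

def solution (scoville : List Int) (K : Int) : Int :=
  solutionALoop K scoville.length (PySem.List.sorted scoville (fun x => x)) 0

-- ===== PORT B =====
-- test of `merged and (not base or merged[0] < base[0])`
def frontIsMerged (base merged : List Int) : Bool :=
  match merged, base with
  | [], _ => false
  | _ :: _, [] => true
  | m :: _, b :: _ => decide (m < b)

-- _pop_min: pop the smaller of the two queue fronts
def popMin (base merged : List Int) : Int × List Int × List Int :=
  if frontIsMerged base merged then (merged.headI, base, merged.tail)
  else (base.headI, base.tail, merged)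

-- B's while-loop over the two sorted queues; the `= 0` branch is where Python raises IndexError
-- (popping from two empty queues, i.e. the empty input, excluded by Pre_); fuel = initial length
-- bounds the number of merges, so the fuel = 0 branch is unreachable.
def solutionBLoop (K : Int) (fuel : Nat) (base merged : List Int) (answer : Int) : Int :=
  if base.length + merged.length = 1 then -1
  else
    match fuel with
    | f + 1 =>
      if base.length + merged.length = 0 then 0
      else
        let p1 := popMin base merged
        let p2 := popMin p1.2.1 p1.2.2
        let m2 := p2.2.2 ++ [p1.1 + 2 * p2.1]
        let cur := if frontIsMerged p2.2.1 m2 then m2.headI else p2.2.1.headI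
        if cur < K then solutionBLoop K f p2.2.1 m2 (answer + 1) else answer + 1
    | 0 => 0

def solution_alt (scoville : List Int) (K : Int) : Int :=
  solutionBLoop K scoville.length (PySem.List.sorted scoville (fun x => x)) [] 0

-- ===== PRECONDITION & SPEC =====
-- Pre_ excludes only the empty list, on which A raises IndexError (popleft from an empty deque).
def Pre_solution (scoville : List Int) (K : Int) : Prop := scoville ≠ []
instance (scoville : List Int) (K : Int) : Decidable (Pre_solution scoville K) := by unfold Pre_solution; infer_instance
def pvWitness_solution : List Int × Int := ([1, 3], 7)

def Spec_solution (scoville : List Int) (K : Int) (out : Int) : Prop := out = solution_alt scoville K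
instance (scoville : List Int) (K : Int) (out : Int) : Decidable (Spec_solution scoville K out) := by unfold Spec_solution; infer_instance

-- ===== CLAIM (what is proved, stated in full; the proofs are below) =====
def Claim_equal_solution : Prop := ∀ (scoville : List Int) (K : Int), Dom_solution scoville K → Pre_solution scoville K → Spec_solution scoville K (solution scoville K)

-- ===== LEMMAS AND PROOFS =====

-- loop invariant for B's merged queue: all of `merged` except its last element is bounded below
-- by some w that also bounds `base`, and the last merged value is at most 3 * w.
def Guard (base merged : List Int) : Prop :=
  ∀ m ∈ merged.getLast?, ∃ w : Int,
    (∀ x ∈ base, w ≤ x) ∧ (∀ x ∈ merged.dropLast, w ≤ x) ∧ m ≤ 3 * w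

lemma pairwise_of_sorted (xs : List Int) :
    (PySem.List.sorted xs (fun x => x)).Pairwise (· ≤ ·) := by
  simpa using PySem.List.sorted_pairwise xs (fun x => x)

lemma aLoop_eq (K : Int) (fuel : Nat) (q : List Int) (ans : Int) :
    solutionALoop K fuel q ans =
    if q.length = 1 then -1
    else
      match q, fuel with
      | a :: b :: rest, f + 1 =>
        if (PySem.List.sorted (rest ++ [a + b * 2]) (fun x => x)).headI < K then
          solutionALoop K f (PySem.List.sorted (rest ++ [a + b * 2]) (fun x => x)) (ans + 1)
        else ans + 1
      | _, _ => 0 := by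
  rw [solutionALoop.eq_def]

lemma bLoop_eq (K : Int) (fuel : Nat) (base merged : List Int) (ans : Int) :
    solutionBLoop K fuel base merged ans =
    if base.length + merged.length = 1 then -1
    else
      match fuel with
      | f + 1 =>
        if base.length + merged.length = 0 then 0
        else
          if (if frontIsMerged (popMin (popMin base merged).2.1 (popMin base merged).2.2).2.1
                ((popMin (popMin base merged).2.1 (popMin base merged).2.2).2.2 ++
                  [(popMin base merged).1 + 2 * (popMin (popMin base merged).2.1 (popMin base merged).2.2).1])
              then ((popMin (popMin base merged).2.1 (popMin base merged).2.2).2.2 ++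
                  [(popMin base merged).1 + 2 * (popMin (popMin base merged).2.1 (popMin base merged).2.2).1]).headI
              else (popMin (popMin base merged).2.1 (popMin base merged).2.2).2.1.headI) < K then
            solutionBLoop K f (popMin (popMin base merged).2.1 (popMin base merged).2.2).2.1
              ((popMin (popMin base merged).2.1 (popMin base merged).2.2).2.2 ++
                [(popMin base merged).1 + 2 * (popMin (popMin base merged).2.1 (popMin base merged).2.2).1])
              (ans + 1)
          else ans + 1
      | 0 => 0 := by
  rw [solutionBLoop.eq_def]

lemma popMin_fst (base merged : List Int) :
    (popMin base merged).1 = if frontIsMerged base merged then merged.headI else base.headI := by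
  unfold popMin; split <;> rfl

lemma popMin_cases (base merged : List Int) (h : ¬(base.length + merged.length = 0)) :
    ∃ v b' m', popMin base merged = (v, b', m') ∧
      ((base = v :: b' ∧ m' = merged) ∨ (merged = v :: m' ∧ b' = base)) := by
  cases base with
  | nil =>
    cases merged with
    | nil => simp at h
    | cons m mt => exact ⟨m, [], mt, by simp [popMin, frontIsMerged], Or.inr ⟨rfl, rfl⟩⟩
  | cons b bt =>
    cases merged with
    | nil => exact ⟨b, bt, [], by simp [popMin, frontIsMerged], Or.inl ⟨rfl, rfl⟩⟩
    | cons m mt =>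
      by_cases hc : m < b
      · exact ⟨m, b :: bt, mt, by simp [popMin, frontIsMerged, hc], Or.inr ⟨rfl, rfl⟩⟩
      · exact ⟨b, bt, m :: mt, by simp [popMin, frontIsMerged, hc], Or.inl ⟨rfl, rfl⟩⟩

lemma popMin_min (base merged : List Int) (hb : base.Pairwise (· ≤ ·))
    (hm : merged.Pairwise (· ≤ ·)) :
    ∀ x ∈ base ++ merged, (popMin base merged).1 ≤ x := by
  intro x hx
  rw [List.mem_append] at hx
  cases base with
  | nil =>
    cases merged with
    | nil => rcases hx with h | h <;> simp at h
    | cons m mt =>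
      simp only [popMin, frontIsMerged]
      rcases hx with h | h
      · simp at h
      · rcases List.mem_cons.1 h with rfl | h
        · simp
        · simpa using List.rel_of_pairwise_cons hm h
  | cons b bt =>
    cases merged with
    | nil =>
      simp only [popMin, frontIsMerged]
      rcases hx with h | h
      · rcases List.mem_cons.1 h with rfl | h
        · simp
        · simpa using List.rel_of_pairwise_cons hb h
      · simp at h
    | cons m mt =>
      by_cases hc : m < b
      all_goals simp only [popMin, frontIsMerged, hc, decide_true, decide_false,
        Bool.false_eq_true, if_true, if_false, List.headI, List.tail]
      · rcases hx with h | h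
        · rcases List.mem_cons.1 h with rfl | h
          · exact le_of_lt hc
          · exact le_trans (le_of_lt hc) (List.rel_of_pairwise_cons hb h)
        · rcases List.mem_cons.1 h with rfl | h
          · rfl
          · exact List.rel_of_pairwise_cons hm h
      · rcases hx with h | h
        · rcases List.mem_cons.1 h with rfl | h
          · rfl
          · exact List.rel_of_pairwise_cons hb h
        · rcases List.mem_cons.1 h with rfl | h
          · omega
          · exact le_trans (by omega) (List.rel_of_pairwise_cons hm h)

lemma popMin_head (base merged : List Int) (hb : base.Pairwise (· ≤ ·))
    (hm : merged.Pairwise (· ≤ ·)) {h : Int} {t : List Int}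
    (hq : PySem.List.sorted (base ++ merged) (fun x => x) = h :: t) :
    (popMin base merged).1 = h := by
  have hnil : base ++ merged ≠ [] := by
    intro he
    rw [← PySem.List.sorted_eq_nil_iff (base ++ merged) (fun x => x) false] at he
    simp [he] at hq
  have hlen : ¬(base.length + merged.length = 0) := by
    cases base <;> cases merged <;> simp_all
  obtain ⟨v, b', m', hp, hcase⟩ := popMin_cases base merged hlen
  have hmem : v ∈ base ++ merged := by
    rcases hcase with ⟨he, _⟩ | ⟨he, _⟩
    · rw [List.mem_append]; left; rw [he]; exact List.mem_cons_self
    · rw [List.mem_append]; right; rw [he]; exact List.mem_cons_self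
  have h1 : h ≤ v :=
    PySem.List.key_head_sorted_le (base ++ merged) (fun x => x) hq _ hmem
  have h2 : v ≤ h := by
    have := popMin_min base merged hb hm h (by
      have : h ∈ PySem.List.sorted (base ++ merged) (fun x => x) := by
        rw [hq]; exact List.mem_cons_self
      exact (PySem.List.sorted_perm (base ++ merged) (fun x => x) false).mem_iff.1 this)
    rwa [hp] at this
  rw [hp]; omega

lemma popMin_perm (base merged : List Int) (h : ¬(base.length + merged.length = 0)) :
    ((popMin base merged).1 :: ((popMin base merged).2.1 ++ (popMin base merged).2.2)).Perm (base ++ merged) := by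
  obtain ⟨v, b', m', hp, hcase⟩ := popMin_cases base merged h
  rw [hp]
  rcases hcase with ⟨he, hme⟩ | ⟨he, hbe⟩
  · rw [he, hme]; exact List.Perm.refl _
  · rw [he, hbe]; exact List.perm_middle.symm

lemma popMin_pairwise (base merged : List Int) (hb : base.Pairwise (· ≤ ·))
    (hm : merged.Pairwise (· ≤ ·)) :
    (popMin base merged).2.1.Pairwise (· ≤ ·) ∧ (popMin base merged).2.2.Pairwise (· ≤ ·) := by
  unfold popMin
  split
  · exact ⟨hb, List.Pairwise.tail hm⟩
  · exact ⟨List.Pairwise.tail hb, hm⟩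

lemma pairwise_le_getLast {l : List Int} (hl : l.Pairwise (· ≤ ·)) :
    ∀ (h : l ≠ []) (x : Int), x ∈ l → x ≤ l.getLast h := by
  induction l with
  | nil => intro h; simp at h
  | cons a t ih =>
    intro h x hx
    cases t with
    | nil => simp at hx; simp [hx]
    | cons b t2 =>
      rcases List.mem_cons.1 hx with rfl | hx2
      · rw [List.getLast_cons (by simp)]
        calc x ≤ b := List.rel_of_pairwise_cons hl List.mem_cons_self
        _ ≤ (b :: t2).getLast (by simp) := ih (List.Pairwise.tail hl) (by simp) b List.mem_cons_self
      · rw [List.getLast_cons (by simp)]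
        exact ih (List.Pairwise.tail hl) (by simp) x hx2

lemma double_pop_bound (base merged : List Int) (hb : base.Pairwise (· ≤ ·))
    (hm : merged.Pairwise (· ≤ ·)) (hg : Guard base merged)
    (h0 : ¬(base.length + merged.length = 0))
    (h1 : ¬((popMin base merged).2.1.length + (popMin base merged).2.2.length = 0)) :
    ∀ x ∈ (popMin (popMin base merged).2.1 (popMin base merged).2.2).2.2,
      x ≤ (popMin base merged).1 + 2 * (popMin (popMin base merged).2.1 (popMin base merged).2.2).1 := by
  obtain ⟨v1, b1, m1, hp1, hc1⟩ := popMin_cases base merged h0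
  rw [hp1] at h1 ⊢
  obtain ⟨v2, b2, m2, hp2, hc2⟩ := popMin_cases b1 m1 (by simpa using h1)
  rw [hp2]
  intro x hx
  simp only at hx ⊢
  -- x ∈ m2; establish x ∈ merged, merged ≠ [], and lower bounds w ≤ v1, w ≤ v2
  have hxmerged : x ∈ merged ∧ merged ≠ [] ∧
      (∀ w : Int, (∀ y ∈ base, w ≤ y) → (∀ y ∈ merged.dropLast, w ≤ y) → w ≤ v1 ∧ w ≤ v2) := by
    rcases hc1 with ⟨he1, hm1⟩ | ⟨he1, hb1⟩
    · -- v1 popped from base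
      rcases hc2 with ⟨he2, hm2⟩ | ⟨he2, hb2⟩
      · -- v2 popped from b1 : m2 = m1 = merged
        subst hm1; subst hm2
        refine ⟨hx, by rintro rfl; simp at hx, ?_⟩
        intro w hwb _
        constructor
        · exact hwb v1 (by rw [he1]; exact List.mem_cons_self)
        · exact hwb v2 (by rw [he1, he2]; exact List.mem_cons_of_mem _ List.mem_cons_self)
      · -- v2 popped from m1 = merged : merged = v2 :: m2
        subst hm1; subst hb2
        have hm2ne : m2 ≠ [] := by rintro rfl; simp at hx
        refine ⟨by rw [he2]; exact List.mem_cons_of_mem _ hx, by rw [he2]; simp, ?_⟩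
        intro w hwb hwd
        constructor
        · exact hwb v1 (by rw [he1]; exact List.mem_cons_self)
        · exact hwd v2 (by rw [he2, List.dropLast_cons_of_ne_nil hm2ne]; exact List.mem_cons_self)
    · -- v1 popped from merged : merged = v1 :: m1
      subst hb1
      rcases hc2 with ⟨he2, hm2⟩ | ⟨he2, hb2⟩
      · -- v2 popped from base; m2 = m1
        have hx1 : x ∈ m1 := hm2 ▸ hx
        have hm1ne : m1 ≠ [] := by intro h; rw [h] at hx1; simp at hx1
        refine ⟨by rw [he1]; exact List.mem_cons_of_mem _ hx1, by rw [he1]; simp, ?_⟩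
        intro w hwb hwd
        constructor
        · exact hwd v1 (by rw [he1, List.dropLast_cons_of_ne_nil hm1ne]; exact List.mem_cons_self)
        · exact hwb v2 (by rw [he2]; exact List.mem_cons_self)
      · -- v2 popped from m1 : merged = v1 :: v2 :: m2
        subst hb2
        have hm2ne : m2 ≠ [] := by rintro rfl; simp at hx
        have hmm : merged = v1 :: v2 :: m2 := by rw [he1, he2]
        refine ⟨by rw [hmm]; exact List.mem_cons_of_mem _ (List.mem_cons_of_mem _ hx), by rw [hmm]; simp, ?_⟩
        intro w _ hwd
        have hd : merged.dropLast = v1 :: v2 :: m2.dropLast := by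
          rw [hmm, List.dropLast_cons_of_ne_nil (by simp), List.dropLast_cons_of_ne_nil hm2ne]
        constructor
        · exact hwd v1 (by rw [hd]; exact List.mem_cons_self)
        · exact hwd v2 (by rw [hd]; exact List.mem_cons_of_mem _ List.mem_cons_self)
  obtain ⟨hxm, hmne, hbound⟩ := hxmerged
  obtain ⟨w, hwb, hwd, hw3⟩ := hg _ ((List.getLast?_eq_getLast hmne) ▸ Option.mem_some_iff.mpr rfl)
  have hxlast : x ≤ merged.getLast hmne := pairwise_le_getLast hm hmne x hxm
  obtain ⟨hwv1, hwv2⟩ := hbound w hwb hwd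
  omega

lemma loopAB (fuel : Nat) : ∀ (base merged : List Int) (K ans : Int),
    base.length + merged.length ≤ fuel + 1 →
    base.Pairwise (· ≤ ·) → merged.Pairwise (· ≤ ·) → Guard base merged →
    base ++ merged ≠ [] →
    solutionALoop K fuel (PySem.List.sorted (base ++ merged) (fun x => x)) ans
      = solutionBLoop K fuel base merged ans := by
  induction fuel with
  | zero =>
    intro base merged K ans hlen hb hm hg hne
    have hlen0 : ¬(base.length + merged.length = 0) := by
      intro h; exact hne (by cases base <;> cases merged <;> simp_all)
    have hql : (PySem.List.sorted (base ++ merged) (fun x => x)).length = base.length + merged.length := by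
      rw [PySem.List.length_sorted, List.length_append]
    rw [aLoop_eq, if_pos (by omega), bLoop_eq, if_pos (by omega)]
  | succ f ih =>
    intro base merged K ans hlen hb hm hg hne
    have hlen0 : ¬(base.length + merged.length = 0) := by
      intro h; exact hne (by cases base <;> cases merged <;> simp_all)
    have hql : (PySem.List.sorted (base ++ merged) (fun x => x)).length = base.length + merged.length := by
      rw [PySem.List.length_sorted, List.length_append]
    by_cases h1 : base.length + merged.length = 1
    · rw [aLoop_eq, if_pos (by omega), bLoop_eq, if_pos h1]
    -- at least two elements in the pool
    obtain ⟨a, b, rest, hq⟩ : ∃ a b rest, PySem.List.sorted (base ++ merged) (fun x => x) = a :: b :: rest := by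
      cases hqe : PySem.List.sorted (base ++ merged) (fun x => x) with
      | nil => rw [hqe] at hql; simp at hql; exact (by omega : False).elim
      | cons a t =>
        cases t with
        | nil => rw [hqe] at hql; simp at hql; exact (by omega : False).elim
        | cons b rest => exact ⟨a, b, rest, rfl⟩
    have hqp : (a :: b :: rest).Pairwise (· ≤ ·) := hq ▸ pairwise_of_sorted (base ++ merged)
    have hab : a ≤ b := List.rel_of_pairwise_cons hqp List.mem_cons_self
    -- first pop
    have hp1v : (popMin base merged).1 = a := popMin_head base merged hb hm hq
    have hpool : (base ++ merged).Perm (a :: b :: rest) := by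
      rw [← hq]; exact (PySem.List.sorted_perm (base ++ merged) (fun x => x) false).symm
    have hperm1 : ((popMin base merged).2.1 ++ (popMin base merged).2.2).Perm (b :: rest) := by
      have e1 := popMin_perm base merged hlen0
      rw [hp1v] at e1
      exact (e1.trans hpool).cons_inv
    have hpw1 := popMin_pairwise base merged hb hm
    have hS1 : PySem.List.sorted ((popMin base merged).2.1 ++ (popMin base merged).2.2) (fun x => x) = b :: rest :=
      PySem.List.sorted_id_eq_of_perm_of_pairwise _ _ hperm1.symm (List.Pairwise.tail hqp)
    have hlen1 : ¬((popMin base merged).2.1.length + (popMin base merged).2.2.length = 0) := by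
      have := hperm1.length_eq; rw [List.length_append] at this; simp at this; omega
    -- second pop
    have hp2v : (popMin (popMin base merged).2.1 (popMin base merged).2.2).1 = b :=
      popMin_head _ _ hpw1.1 hpw1.2 hS1
    have hperm2 : ((popMin (popMin base merged).2.1 (popMin base merged).2.2).2.1 ++
        (popMin (popMin base merged).2.1 (popMin base merged).2.2).2.2).Perm rest := by
      have e1 := popMin_perm _ _ hlen1
      rw [hp2v] at e1
      exact (e1.trans hperm1).cons_inv
    have hpw2 := popMin_pairwise _ _ hpw1.1 hpw1.2
    have hrest : ∀ x, x ∈ (popMin (popMin base merged).2.1 (popMin base merged).2.2).2.1 ∨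
        x ∈ (popMin (popMin base merged).2.1 (popMin base merged).2.2).2.2 → b ≤ x := by
      intro x hx
      have : x ∈ rest := hperm2.mem_iff.1 (List.mem_append.2 hx)
      exact List.rel_of_pairwise_cons (List.Pairwise.tail hqp) this
    -- the created value
    have hvv : (popMin base merged).1 + 2 * (popMin (popMin base merged).2.1 (popMin base merged).2.2).1 = a + b * 2 := by
      rw [hp1v, hp2v]; ring
    have hbound := double_pop_bound base merged hb hm hg hlen0 hlen1
    have hpwnew : ((popMin (popMin base merged).2.1 (popMin base merged).2.2).2.2 ++
        [(popMin base merged).1 + 2 * (popMin (popMin base merged).2.1 (popMin base merged).2.2).1]).Pairwise (· ≤ ·) := by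
      rw [List.pairwise_append]
      refine ⟨hpw2.2, by simp, ?_⟩
      intro x hx y hy
      rw [List.mem_singleton] at hy
      subst hy
      exact hbound x hx
    have hgnew : Guard (popMin (popMin base merged).2.1 (popMin base merged).2.2).2.1
        ((popMin (popMin base merged).2.1 (popMin base merged).2.2).2.2 ++
          [(popMin base merged).1 + 2 * (popMin (popMin base merged).2.1 (popMin base merged).2.2).1]) := by
      intro m hmem
      rw [List.getLast?_concat, Option.mem_some_iff] at hmem
      subst hmem
      refine ⟨b, ?_, ?_, ?_⟩
      · intro x hx; exact hrest x (Or.inl hx)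
      · intro x hx; rw [List.dropLast_concat] at hx; exact hrest x (Or.inr hx)
      · rw [hvv]; omega
    have hpermNew : ((popMin (popMin base merged).2.1 (popMin base merged).2.2).2.1 ++
        ((popMin (popMin base merged).2.1 (popMin base merged).2.2).2.2 ++
          [(popMin base merged).1 + 2 * (popMin (popMin base merged).2.1 (popMin base merged).2.2).1])).Perm
        (rest ++ [a + b * 2]) := by
      rw [← List.append_assoc, hvv]
      exact hperm2.append_right _
    have hSnew : PySem.List.sorted ((popMin (popMin base merged).2.1 (popMin base merged).2.2).2.1 ++
        ((popMin (popMin base merged).2.1 (popMin base merged).2.2).2.2 ++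
          [(popMin base merged).1 + 2 * (popMin (popMin base merged).2.1 (popMin base merged).2.2).1])) (fun x => x)
        = PySem.List.sorted (rest ++ [a + b * 2]) (fun x => x) :=
      (PySem.List.sorted_id_eq_sorted_id_iff_perm _ _).mpr hpermNew
    have hqlen2 : rest.length + 2 = base.length + merged.length := by
      rw [hq] at hql; simp at hql; omega
    obtain ⟨h2, t2, hq2⟩ : ∃ h2 t2, PySem.List.sorted (rest ++ [a + b * 2]) (fun x => x) = h2 :: t2 := by
      cases hqe : PySem.List.sorted (rest ++ [a + b * 2]) (fun x => x) with
      | nil => rw [PySem.List.sorted_eq_nil_iff] at hqe; simp at hqe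
      | cons h2 t2 => exact ⟨h2, t2, rfl⟩
    have hcur2 : (if frontIsMerged (popMin (popMin base merged).2.1 (popMin base merged).2.2).2.1
        ((popMin (popMin base merged).2.1 (popMin base merged).2.2).2.2 ++
          [(popMin base merged).1 + 2 * (popMin (popMin base merged).2.1 (popMin base merged).2.2).1])
        then ((popMin (popMin base merged).2.1 (popMin base merged).2.2).2.2 ++
          [(popMin base merged).1 + 2 * (popMin (popMin base merged).2.1 (popMin base merged).2.2).1]).headI
        else (popMin (popMin base merged).2.1 (popMin base merged).2.2).2.1.headI) = h2 := by
      rw [← popMin_fst]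
      exact popMin_head _ _ hpw2.1 hpwnew (by rw [hSnew, hq2])
    have eA1 : ¬((a :: b :: rest).length = 1) := by simp
    rw [hq, aLoop_eq, if_neg eA1, bLoop_eq, if_neg h1]
    dsimp only
    rw [if_neg hlen0, hcur2]
    by_cases hK : h2 < K
    · rw [if_pos (by rw [hq2]; simpa using hK), if_pos hK]
      have := ih (popMin (popMin base merged).2.1 (popMin base merged).2.2).2.1
        ((popMin (popMin base merged).2.1 (popMin base merged).2.2).2.2 ++
          [(popMin base merged).1 + 2 * (popMin (popMin base merged).2.1 (popMin base merged).2.2).1])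
        K (ans + 1)
        (by have := hpermNew.length_eq; simp [List.length_append] at this ⊢; omega)
        hpw2.1 hpwnew hgnew (by simp)
      rw [hSnew] at this
      exact this
    · rw [if_neg (by rw [hq2]; simpa using hK), if_neg hK]

-- ===== VERDICT (by name: the statement is the Claim_ definition above) =====
theorem solution_spec : Claim_equal_solution := by
  intro scoville K _ hpre
  unfold Spec_solution solution solution_alt
  have hsne : PySem.List.sorted scoville (fun x => x) ≠ [] := by
    rw [Ne, PySem.List.sorted_eq_nil_iff]; exact hpre
  have hSS : PySem.List.sorted (PySem.List.sorted scoville (fun x => x) ++ ([] : List Int)) (fun x => x)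
      = PySem.List.sorted scoville (fun x => x) := by
    rw [List.append_nil]; exact PySem.List.sorted_sorted scoville (fun x => x)
  have := loopAB scoville.length (PySem.List.sorted scoville (fun x => x)) [] K 0
    (by rw [PySem.List.length_sorted]; simp)
    (pairwise_of_sorted scoville) (by simp) (by intro m hm; simp at hm) (by simp [hsne])
  rw [hSS] at this
  exact this
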